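-- pv_equiv track=rewrite | github.com/Mehrdadghassabi/UI-Pacman | client_crazy/tools.py | find_gems
-- ===== SOURCE A (Python) =====
-- def is_gem(my_grid: list, r, c):
--     if my_grid[r][c] == '1' or my_grid[r][c] == '2' or \
--             my_grid[r][c] == '3' or my_grid[r][c] == '4':
--         return True
--     return False
--
-- def find_gems(my_grid: list):
--     gems_list = []
--     for r in range(len(my_grid)):
--         for c in range(len(my_grid[0])):
--             if is_gem(my_grid, r, c):
--                 gems_list.append((int(my_grid[r][c]), (r, c)))
--     gems_list.sort()
--     return gems_list
-- ===== SOURCE B (Python) =====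
-- def find_gems(my_grid: list):
--     # Bucket by gem value 1-4; the row-major scan keeps each bucket sorted,
--     # so concatenating the buckets is the sorted result without a sort call.
--     buckets = ([], [], [], [])
--     for r in range(len(my_grid)):
--         for c in range(len(my_grid[0])):
--             v = my_grid[r][c]
--             if v in ('1', '2', '3', '4'):
--                 k = int(v)
--                 buckets[k - 1].append((k, (r, c)))
--     return buckets[0] + buckets[1] + buckets[2] + buckets[3]
-- ===== Notes on version B (the rewrite author's own statement) =====
-- stated objective: alternative
-- what changed: Replaces collect-then-sort with four value-indexed buckets filled during the same row-major scan; since the scan visits cells in ascending (r,c) order each bucket is already sorted, so concatenating buckets 1..4 eliminates the sort pass.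
import Mathlib
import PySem

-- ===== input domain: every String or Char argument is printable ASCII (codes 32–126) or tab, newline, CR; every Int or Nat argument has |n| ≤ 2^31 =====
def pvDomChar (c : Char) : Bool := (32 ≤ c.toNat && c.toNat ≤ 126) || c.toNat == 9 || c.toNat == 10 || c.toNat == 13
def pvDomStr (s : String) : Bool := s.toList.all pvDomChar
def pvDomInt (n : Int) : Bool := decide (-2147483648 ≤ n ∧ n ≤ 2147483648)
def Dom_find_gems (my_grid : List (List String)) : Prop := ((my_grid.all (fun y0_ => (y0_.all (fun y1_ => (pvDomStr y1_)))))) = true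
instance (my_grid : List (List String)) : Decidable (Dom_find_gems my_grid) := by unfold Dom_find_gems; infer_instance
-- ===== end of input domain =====

-- B replaces A's collect-then-sort by four value buckets filled in the same row-major scan
-- and concatenated at the end (the scan order makes each bucket already sorted).


-- ===== PORT A =====
-- my_grid[r][c]; Pre_ guarantees the indices are in range, so getD's defaults are never used
def cellAt (my_grid : List (List String)) (r c : Nat) : String :=
  (my_grid.getD r []).getD c ""

def is_gem (my_grid : List (List String)) (r c : Nat) : Bool :=
  cellAt my_grid r c == "1" || cellAt my_grid r c == "2" ||
  cellAt my_grid r c == "3" || cellAt my_grid r c == "4"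

-- Python's tuple '<' is lexicographic: the sort key is the lex encoding of the tuple
def keyF (x : Int × (Int × Int)) : Lex (Int × Lex (Int × Int)) := toLex (x.1, toLex x.2)

def find_gems (my_grid : List (List String)) : List (Int × (Int × Int)) :=
  let gems_list :=
    (List.range my_grid.length).foldl (fun acc r =>
      (List.range (my_grid.headD []).length).foldl (fun acc c =>
        if is_gem my_grid r c then
          acc ++ [((PySem.Int.ofStr? (cellAt my_grid r c)).getD 0, ((r : Int), (c : Int)))]
        else acc) acc) []
  PySem.List.sorted gems_list keyF false

-- ===== PORT B =====
def find_gems_alt (my_grid : List (List String)) : List (Int × (Int × Int)) :=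
  let buckets :=
    (List.range my_grid.length).foldl (fun bs r =>
      (List.range (my_grid.headD []).length).foldl (fun bs c =>
        let v := cellAt my_grid r c
        ( (if v = "1" then bs.1 ++ [(1, ((r : Int), (c : Int)))] else bs.1),
          (if v = "2" then bs.2.1 ++ [(2, ((r : Int), (c : Int)))] else bs.2.1),
          (if v = "3" then bs.2.2.1 ++ [(3, ((r : Int), (c : Int)))] else bs.2.2.1),
          (if v = "4" then bs.2.2.2 ++ [(4, ((r : Int), (c : Int)))] else bs.2.2.2) )) bs) (([], [], [], []) : List (Int × (Int × Int)) × List (Int × (Int × Int)) × List (Int × (Int × Int)) × List (Int × (Int × Int)))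
  buckets.1 ++ buckets.2.1 ++ buckets.2.2.1 ++ buckets.2.2.2

-- ===== PRECONDITION & SPEC =====
-- Pre_ excludes exactly the ragged grids on which A raises IndexError: some row is
-- shorter than row 0 (the inner loop always runs over range(len(my_grid[0]))).
def Pre_find_gems (my_grid : List (List String)) : Prop :=
  ∀ row ∈ my_grid, (my_grid.headD []).length ≤ row.length
instance (my_grid : List (List String)) : Decidable (Pre_find_gems my_grid) := by unfold Pre_find_gems; infer_instance

def pvWitness_find_gems : List (List String) := [["1", "x"], ["4", "2"], [".", "2"]]

def Spec_find_gems (my_grid : List (List String)) (out : List (Int × (Int × Int))) : Prop := out = find_gems_alt my_grid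
instance (my_grid : List (List String)) (out : List (Int × (Int × Int))) : Decidable (Spec_find_gems my_grid out) := by unfold Spec_find_gems; infer_instance

-- ===== CLAIM (what is proved, stated in full; the proofs are below) =====
def Claim_equal_find_gems : Prop := ∀ (my_grid : List (List String)), Dom_find_gems my_grid → Pre_find_gems my_grid → Spec_find_gems my_grid (find_gems my_grid)

-- ===== LEMMAS AND PROOFS =====

def gemsRow (g : List (List String)) (r : Nat) : List (Int × (Int × Int)) :=
  ((List.range (g.headD []).length).filter (fun c => is_gem g r c)).map
    (fun c => ((PySem.Int.ofStr? (cellAt g r c)).getD 0, ((r : Int), (c : Int))))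

theorem A_shape (g : List (List String)) :
    find_gems g = PySem.List.sorted ((List.range g.length).flatMap (gemsRow g)) keyF false := by
  show PySem.List.sorted _ keyF false = _
  simp only [PySem.List.foldl_append_if, PySem.List.foldl_append_eq_flatMap, List.nil_append]
  rfl

theorem foldl_quad {γ β : Type} (l : List γ) (p1 p2 p3 p4 : γ → Prop)
    [DecidablePred p1] [DecidablePred p2] [DecidablePred p3] [DecidablePred p4]
    (e1 e2 e3 e4 : γ → β) (bs : List β × List β × List β × List β) :
    l.foldl (fun bs x =>
      ((if p1 x then bs.1 ++ [e1 x] else bs.1),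
       (if p2 x then bs.2.1 ++ [e2 x] else bs.2.1),
       (if p3 x then bs.2.2.1 ++ [e3 x] else bs.2.2.1),
       (if p4 x then bs.2.2.2 ++ [e4 x] else bs.2.2.2))) bs
    = (bs.1 ++ (l.filter (fun x => decide (p1 x))).map e1,
       bs.2.1 ++ (l.filter (fun x => decide (p2 x))).map e2,
       bs.2.2.1 ++ (l.filter (fun x => decide (p3 x))).map e3,
       bs.2.2.2 ++ (l.filter (fun x => decide (p4 x))).map e4) := by
  induction l generalizing bs with
  | nil => simp
  | cons x t ih =>
    rw [List.foldl_cons, ih]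
    by_cases h1 : p1 x <;> by_cases h2 : p2 x <;> by_cases h3 : p3 x <;> by_cases h4 : p4 x <;>
      simp [h1, h2, h3, h4]

theorem foldl_quad_app {γ β : Type} (l : List γ) (h1 h2 h3 h4 : γ → List β) (bs : List β × List β × List β × List β) :
    l.foldl (fun bs x => (bs.1 ++ h1 x, bs.2.1 ++ h2 x, bs.2.2.1 ++ h3 x, bs.2.2.2 ++ h4 x)) bs
    = (bs.1 ++ l.flatMap h1, bs.2.1 ++ l.flatMap h2, bs.2.2.1 ++ l.flatMap h3, bs.2.2.2 ++ l.flatMap h4) := by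
  induction l generalizing bs with
  | nil => simp
  | cons x t ih => rw [List.foldl_cons, ih]; simp

def bRow (g : List (List String)) (s : String) (k : Int) (r : Nat) : List (Int × (Int × Int)) :=
  ((List.range (g.headD []).length).filter (fun c => decide (cellAt g r c = s))).map
    (fun (c : Nat) => (k, ((r : Int), (c : Int))))

theorem B_shape (g : List (List String)) :
    find_gems_alt g = (List.range g.length).flatMap (bRow g "1" 1)
      ++ (List.range g.length).flatMap (bRow g "2" 2)
      ++ (List.range g.length).flatMap (bRow g "3" 3)
      ++ (List.range g.length).flatMap (bRow g "4" 4) := by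
  unfold find_gems_alt
  simp only [foldl_quad, foldl_quad_app, List.nil_append]
  unfold bRow
  rfl

theorem keyF_lt (a b : Int × (Int × Int)) :
    keyF a < keyF b ↔ a.1 < b.1 ∨ (a.1 = b.1 ∧ (a.2.1 < b.2.1 ∨ (a.2.1 = b.2.1 ∧ a.2.2 < b.2.2))) := by
  simp [keyF, Prod.Lex.toLex_lt_toLex]

theorem bucket_pairwise (g : List (List String)) (s : String) (k : Int) :
    List.Pairwise (fun a b => keyF a < keyF b) ((List.range g.length).flatMap (bRow g s k)) := by
  rw [List.pairwise_flatMap]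
  constructor
  · intro r _
    unfold bRow
    refine List.Pairwise.map _ ?_ (List.Pairwise.filter _ List.pairwise_lt_range)
    intro c c' hcc
    rw [keyF_lt]
    exact Or.inr ⟨rfl, Or.inr ⟨rfl, by show (c:Int) < (c':Int); exact_mod_cast hcc⟩⟩
  · refine List.Pairwise.imp ?_ List.pairwise_lt_range
    intro r1 r2 h12 x hx y hy
    unfold bRow at hx hy
    obtain ⟨c1, -, rfl⟩ := List.mem_map.mp hx
    obtain ⟨c2, -, rfl⟩ := List.mem_map.mp hy
    rw [keyF_lt]
    exact Or.inr ⟨rfl, Or.inl (by show (r1:Int) < (r2:Int); exact_mod_cast h12)⟩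

theorem mem_bucket_fst (g : List (List String)) (s : String) (k : Int) (x : Int × (Int × Int))
    (h : x ∈ (List.range g.length).flatMap (bRow g s k)) : x.1 = k := by
  obtain ⟨r, -, hx⟩ := List.mem_flatMap.mp h
  unfold bRow at hx
  obtain ⟨c, -, rfl⟩ := List.mem_map.mp hx
  rfl

theorem concat_pairwise (g : List (List String)) :
    List.Pairwise (fun a b => keyF a < keyF b)
      ((List.range g.length).flatMap (bRow g "1" 1)
        ++ (List.range g.length).flatMap (bRow g "2" 2)
        ++ (List.range g.length).flatMap (bRow g "3" 3)
        ++ (List.range g.length).flatMap (bRow g "4" 4)) := by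
  have cross : ∀ (s t : String) (k k' : Int), k < k' →
      ∀ x ∈ (List.range g.length).flatMap (bRow g s k),
      ∀ y ∈ (List.range g.length).flatMap (bRow g t k'), keyF x < keyF y := by
    intro s t k k' hkk x hx y hy
    rw [keyF_lt, mem_bucket_fst g s k x hx, mem_bucket_fst g t k' y hy]
    exact Or.inl hkk
  rw [List.pairwise_append, List.pairwise_append, List.pairwise_append]
  refine ⟨⟨⟨bucket_pairwise g "1" 1, bucket_pairwise g "2" 2, ?_⟩, bucket_pairwise g "3" 3, ?_⟩,
    bucket_pairwise g "4" 4, ?_⟩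
  · exact cross "1" "2" 1 2 (by norm_num)
  · intro x hx y hy
    rcases List.mem_append.mp hx with h | h
    · exact cross "1" "3" 1 3 (by norm_num) x h y hy
    · exact cross "2" "3" 2 3 (by norm_num) x h y hy
  · intro x hx y hy
    rcases List.mem_append.mp hx with h | h
    · rcases List.mem_append.mp h with h' | h'
      · exact cross "1" "4" 1 4 (by norm_num) x h' y hy
      · exact cross "2" "4" 2 4 (by norm_num) x h' y hy
    · exact cross "3" "4" 3 4 (by norm_num) x h y hy

theorem filter_perm4 {α : Type} [DecidableEq α] (l : List α) (p q1 q2 q3 q4 : α → Bool)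
    (hp : ∀ x ∈ l, p x = (q1 x || q2 x || q3 x || q4 x))
    (hd : ∀ x ∈ l, (q1 x).toNat + (q2 x).toNat + (q3 x).toNat + (q4 x).toNat ≤ 1) :
    (l.filter p).Perm (l.filter q1 ++ l.filter q2 ++ l.filter q3 ++ l.filter q4) := by
  rw [List.perm_iff_count]
  intro a
  have cf : ∀ q : α → Bool, (l.filter q).count a = if q a then l.count a else 0 := by
    intro q
    by_cases h : q a = true
    · simp [h, List.count_filter h]
    · simp [h, List.count_eq_zero_of_not_mem (fun hm => h (List.mem_filter.mp hm).2)]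
  by_cases ha : a ∈ l
  · have h1 := hp a ha
    have h2 := hd a ha
    simp only [List.count_append, cf, h1]
    by_cases hq1 : q1 a <;> by_cases hq2 : q2 a <;> by_cases hq3 : q3 a <;> by_cases hq4 : q4 a <;> simp_all
  · simp [List.count_append, cf, List.count_eq_zero_of_not_mem ha]

theorem flatMap_append_perm {α β : Type} (l : List α) (f g : α → List β) :
    (l.flatMap (fun x => f x ++ g x)).Perm (l.flatMap f ++ l.flatMap g) := by
  induction l with
  | nil => simp
  | cons x t ih =>
    simp only [List.flatMap_cons, List.append_assoc]
    exact ((ih.append_left _).append_left _).trans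
      (List.Perm.append_left _ (List.perm_append_comm_assoc _ _ _))

theorem row_perm (g : List (List String)) (r : Nat) :
    (gemsRow g r).Perm (bRow g "1" 1 r ++ bRow g "2" 2 r ++ bRow g "3" 3 r ++ bRow g "4" 4 r) := by
  have hpq : ∀ c ∈ List.range (g.headD []).length, is_gem g r c =
      (decide (cellAt g r c = "1") || decide (cellAt g r c = "2") ||
       decide (cellAt g r c = "3") || decide (cellAt g r c = "4")) := by
    intro c _
    by_cases h1 : cellAt g r c = "1" <;> by_cases h2 : cellAt g r c = "2" <;>
      by_cases h3 : cellAt g r c = "3" <;> by_cases h4 : cellAt g r c = "4" <;>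
      simp_all [is_gem]
  have hd : ∀ c ∈ List.range (g.headD []).length,
      (decide (cellAt g r c = "1")).toNat + (decide (cellAt g r c = "2")).toNat +
      (decide (cellAt g r c = "3")).toNat + (decide (cellAt g r c = "4")).toNat ≤ 1 := by
    intro c _
    by_cases h1 : cellAt g r c = "1" <;> by_cases h2 : cellAt g r c = "2" <;>
      by_cases h3 : cellAt g r c = "3" <;> by_cases h4 : cellAt g r c = "4" <;>
      simp_all
  have base := (filter_perm4 (List.range (g.headD []).length)
      (fun c => is_gem g r c)
      (fun c => decide (cellAt g r c = "1")) (fun c => decide (cellAt g r c = "2"))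
      (fun c => decide (cellAt g r c = "3")) (fun c => decide (cellAt g r c = "4"))
      hpq hd).map
      (fun c => ((PySem.Int.ofStr? (cellAt g r c)).getD 0, ((r : Int), (c : Int))))
  rw [List.map_append, List.map_append, List.map_append] at base
  have conv : ∀ (s : String) (k : Int), (PySem.Int.ofStr? s).getD 0 = k →
      ((List.range (g.headD []).length).filter (fun c => decide (cellAt g r c = s))).map
        (fun c => ((PySem.Int.ofStr? (cellAt g r c)).getD 0, ((r : Int), (c : Int)))) = bRow g s k r := by
    intro s k hk
    unfold bRow
    refine List.map_congr_left ?_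
    intro c hc
    have := (List.mem_filter.mp hc).2
    simp only [decide_eq_true_eq] at this
    rw [this, hk]
  rw [conv "1" 1 rfl, conv "2" 2 rfl, conv "3" 3 rfl, conv "4" 4 rfl] at base
  exact base

theorem total_perm (g : List (List String)) :
    ((List.range g.length).flatMap (bRow g "1" 1)
      ++ (List.range g.length).flatMap (bRow g "2" 2)
      ++ (List.range g.length).flatMap (bRow g "3" 3)
      ++ (List.range g.length).flatMap (bRow g "4" 4)).Perm
      ((List.range g.length).flatMap (gemsRow g)) := by
  have h1 : ((List.range g.length).flatMap (gemsRow g)).Perm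
      ((List.range g.length).flatMap (fun r => bRow g "1" 1 r ++ bRow g "2" 2 r ++ bRow g "3" 3 r ++ bRow g "4" 4 r)) :=
    List.Perm.flatMap_left _ (fun r _ => row_perm g r)
  have h2 := flatMap_append_perm (List.range g.length)
      (fun r => bRow g "1" 1 r ++ bRow g "2" 2 r ++ bRow g "3" 3 r) (bRow g "4" 4)
  have h3 := flatMap_append_perm (List.range g.length)
      (fun r => bRow g "1" 1 r ++ bRow g "2" 2 r) (bRow g "3" 3)
  have h4 := flatMap_append_perm (List.range g.length) (bRow g "1" 1) (bRow g "2" 2)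
  exact ((h1.trans (h2.trans ((h3.trans (h4.append_right _)).append_right _))).symm)

theorem main_eq (g : List (List String)) : find_gems g = find_gems_alt g := by
  rw [A_shape, B_shape]
  exact PySem.List.sorted_eq_of_perm_of_pairwise_lt _ _ keyF (total_perm g) (concat_pairwise g)

-- ===== VERDICT (by name: the statement is the Claim_ definition above) =====
theorem find_gems_spec : Claim_equal_find_gems := by
  intro g _ _
  unfold Spec_find_gems
  exact main_eq g
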